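-- pv_equiv track=rewrite | github.com/nazimurahman/CyberGuard | main.py | _check_pci_dss_compliance
-- ===== SOURCE A (Python) =====
-- from typing import Dict, Any, List, Optional, Tuple, Union  # Type hints for better code documentation
--
-- def _check_pci_dss_compliance(vulnerabilities: List[Dict]) -> List[str]:
--     """
--     Check PCI DSS compliance violations.
--
--     Args:
--         vulnerabilities (List[Dict]): List of vulnerability findings
--
--     Returns:
--         List[str]: List of PCI DSS violations found
--     """
--     pci_requirements = {
--         'Req 1: Firewall Configuration': ['firewall', 'network security'],
--         'Req 2: System Passwords': ['password', 'default credential'],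
--         'Req 3: Protect Cardholder Data': ['cardholder', 'pci', 'encryption'],
--         'Req 4: Encrypt Transmission': ['ssl', 'tls', 'encryption in transit'],
--         'Req 5: Anti-virus': ['malware', 'virus', 'antivirus'],
--         'Req 6: Secure Systems': ['patch', 'update', 'vulnerability'],
--         'Req 7: Access Control': ['access control', 'least privilege'],
--         'Req 8: Authentication': ['authentication', 'multi-factor', 'mfa'],
--         'Req 9: Physical Security': ['physical', 'access log'],
--         'Req 10: Monitoring': ['logging', 'monitoring', 'audit trail'],
--         'Req 11: Security Testing': ['testing', 'scan', 'penetration test'],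
--         'Req 12: Security Policy': ['policy', 'procedure', 'documentation']
--     }
--
--     violations = []
--     for requirement, keywords in pci_requirements.items():
--         for vuln in vulnerabilities:
--             description = vuln.get('description', '').lower()
--             if any(keyword in description for keyword in keywords):
--                 violations.append(requirement)
--                 break
--
--     return violations
-- ===== SOURCE B (Python) =====
-- def _check_pci_dss_compliance(vulnerabilities):
--     pci_requirements = {
--         'Req 1: Firewall Configuration': ['firewall', 'network security'],
--         'Req 2: System Passwords': ['password', 'default credential'],
--         'Req 3: Protect Cardholder Data': ['cardholder', 'pci', 'encryption'],
--         'Req 4: Encrypt Transmission': ['ssl', 'tls', 'encryption in transit'],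
--         'Req 5: Anti-virus': ['malware', 'virus', 'antivirus'],
--         'Req 6: Secure Systems': ['patch', 'update', 'vulnerability'],
--         'Req 7: Access Control': ['access control', 'least privilege'],
--         'Req 8: Authentication': ['authentication', 'multi-factor', 'mfa'],
--         'Req 9: Physical Security': ['physical', 'access log'],
--         'Req 10: Monitoring': ['logging', 'monitoring', 'audit trail'],
--         'Req 11: Security Testing': ['testing', 'scan', 'penetration test'],
--         'Req 12: Security Policy': ['policy', 'procedure', 'documentation']
--     }
--     matched = set()
--     for vuln in vulnerabilities:
--         description = vuln.get('description', '').lower()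
--         for requirement, keywords in pci_requirements.items():
--             if any(keyword in description for keyword in keywords):
--                 matched.add(requirement)
--     return [req for req in pci_requirements if req in matched]
-- ===== Notes on version B (the rewrite author's own statement) =====
-- stated objective: alternative
-- what changed: Inverted the loop nesting: B scans the vulnerabilities once, lower-casing each description a single time and recording every matched requirement in a set, then emits the violated requirements in one ordered pass over the requirement table; A loops requirements outer, re-lowercases each description per requirement, and breaks on the first matching vulnerability.
import Mathlib
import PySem

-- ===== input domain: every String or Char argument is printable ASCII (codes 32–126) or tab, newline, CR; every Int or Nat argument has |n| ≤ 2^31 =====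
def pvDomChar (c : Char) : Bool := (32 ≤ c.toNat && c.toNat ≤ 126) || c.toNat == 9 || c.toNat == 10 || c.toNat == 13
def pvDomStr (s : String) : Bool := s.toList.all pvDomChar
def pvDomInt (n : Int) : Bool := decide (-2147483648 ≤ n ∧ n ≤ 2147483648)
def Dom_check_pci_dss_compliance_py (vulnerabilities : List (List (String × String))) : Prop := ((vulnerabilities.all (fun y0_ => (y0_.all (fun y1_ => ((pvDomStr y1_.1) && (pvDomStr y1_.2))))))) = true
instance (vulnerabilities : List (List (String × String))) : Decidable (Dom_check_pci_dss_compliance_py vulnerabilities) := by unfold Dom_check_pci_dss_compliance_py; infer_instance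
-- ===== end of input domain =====

-- B inverts the loop nesting: one scan over the vulnerabilities building a set of matched
-- requirements (lower-casing each description once), then one ordered pass over the
-- requirement table; A loops requirements outer with break-on-first-matching-vulnerability.

-- ===== PORT A =====
-- the literal PCI DSS requirement table (shared data, used by both ports)
def pciRequirements : List (String × List String) := [
  ("Req 1: Firewall Configuration", ["firewall", "network security"]),
  ("Req 2: System Passwords", ["password", "default credential"]),
  ("Req 3: Protect Cardholder Data", ["cardholder", "pci", "encryption"]),
  ("Req 4: Encrypt Transmission", ["ssl", "tls", "encryption in transit"]),
  ("Req 5: Anti-virus", ["malware", "virus", "antivirus"]),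
  ("Req 6: Secure Systems", ["patch", "update", "vulnerability"]),
  ("Req 7: Access Control", ["access control", "least privilege"]),
  ("Req 8: Authentication", ["authentication", "multi-factor", "mfa"]),
  ("Req 9: Physical Security", ["physical", "access log"]),
  ("Req 10: Monitoring", ["logging", "monitoring", "audit trail"]),
  ("Req 11: Security Testing", ["testing", "scan", "penetration test"]),
  ("Req 12: Security Policy", ["policy", "procedure", "documentation"])]

-- A's inner 'for vuln in vulnerabilities: … break' loop
def pciInnerA (keywords : List String) (requirement : String)
    (vulns : List (List (String × String))) (violations : List String) : List String :=
  match vulns with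
  | [] => violations
  | vuln :: rest =>
    let description := PySem.Str.lower ((List.lookup "description" vuln).getD "")
    if keywords.any (fun keyword => PySem.Str.isIn keyword description) then
      violations ++ [requirement]
    else
      pciInnerA keywords requirement rest violations

def check_pci_dss_compliance_py (vulnerabilities : List (List (String × String))) : List String :=
  pciRequirements.foldl (fun violations p => pciInnerA p.2 p.1 vulnerabilities violations) []

-- ===== PORT B =====
def check_pci_dss_compliance_py_alt (vulnerabilities : List (List (String × String))) : List String :=
  let matched : PySem.Set String :=
    vulnerabilities.foldl (fun m vuln =>
      let description := PySem.Str.lower ((List.lookup "description" vuln).getD "")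
      pciRequirements.foldl (fun m p =>
        if p.2.any (fun keyword => PySem.Str.isIn keyword description) then
          PySem.Set.add m p.1
        else m) m)
      PySem.Set.empty
  (pciRequirements.map Prod.fst).filter (fun req => PySem.Set.contains matched req)

-- ===== PRECONDITION & SPEC =====
def Spec_check_pci_dss_compliance_py (vulnerabilities : List (List (String × String))) (out : List String) : Prop := out = check_pci_dss_compliance_py_alt vulnerabilities
instance (vulnerabilities : List (List (String × String))) (out : List String) : Decidable (Spec_check_pci_dss_compliance_py vulnerabilities out) := by unfold Spec_check_pci_dss_compliance_py; infer_instance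

-- ===== CLAIM (what is proved, stated in full; the proofs are below) =====
def Claim_equal_check_pci_dss_compliance_py : Prop := ∀ (vulnerabilities : List (List (String × String))), Dom_check_pci_dss_compliance_py vulnerabilities → Spec_check_pci_dss_compliance_py vulnerabilities (check_pci_dss_compliance_py vulnerabilities)

-- ===== LEMMAS AND PROOFS =====

-- does this vulnerability's description match this keyword list?
def pvMatch (vuln : List (String × String)) (keywords : List String) : Bool :=
  keywords.any (fun keyword =>
    PySem.Str.isIn keyword (PySem.Str.lower ((List.lookup "description" vuln).getD "")))

theorem pciInnerA_eq (keywords : List String) (req : String)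
    (vulns : List (List (String × String))) (acc : List String) :
    pciInnerA keywords req vulns acc =
      if vulns.any (fun v => pvMatch v keywords) then acc ++ [req] else acc := by
  induction vulns with
  | nil => simp [pciInnerA]
  | cons v rest ih =>
    simp only [pciInnerA, List.any_cons]
    unfold pvMatch at ih ⊢
    by_cases h : (keywords.any fun keyword =>
        PySem.Str.isIn keyword (PySem.Str.lower ((List.lookup "description" v).getD ""))) = true
    · simp only [h, Bool.true_or, if_true]
    · simp only [Bool.not_eq_true] at h
      simp only [h, Bool.false_or, Bool.false_eq_true, if_false, ih]

theorem foldA_eq (vulns : List (List (String × String)))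
    (reqs : List (String × List String)) (acc : List String) :
    reqs.foldl (fun violations p => pciInnerA p.2 p.1 vulns violations) acc =
      acc ++ (reqs.filter (fun p => vulns.any (fun v => pvMatch v p.2))).map Prod.fst := by
  induction reqs generalizing acc with
  | nil => simp
  | cons p rest ih =>
    rw [List.foldl_cons, pciInnerA_eq, List.filter_cons]
    by_cases h : (vulns.any fun v => pvMatch v p.2) = true
    · rw [if_pos h, if_pos h, ih, List.map_cons]
      simp
    · rw [if_neg h, if_neg h, ih]

theorem pv_contains_add (s : PySem.Set String) (a x : String) :
    PySem.Set.contains (PySem.Set.add s a) x = (PySem.Set.contains s x || x == a) := by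
  rw [Bool.eq_iff_iff]
  simp [PySem.Set.mem_add]

theorem contains_innerB (v : List (String × String)) (reqs : List (String × List String))
    (m : PySem.Set String) (x : String) :
    PySem.Set.contains
      (reqs.foldl (fun m p =>
        if p.2.any (fun keyword =>
            PySem.Str.isIn keyword (PySem.Str.lower ((List.lookup "description" v).getD ""))) then
          PySem.Set.add m p.1
        else m) m) x
      = (PySem.Set.contains m x || reqs.any (fun p => x == p.1 && pvMatch v p.2)) := by
  induction reqs generalizing m with
  | nil => simp
  | cons p rest ih =>
    simp only [List.foldl_cons, List.any_cons]
    by_cases h : (p.2.any fun keyword =>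
        PySem.Str.isIn keyword (PySem.Str.lower ((List.lookup "description" v).getD ""))) = true
    · rw [if_pos h, ih, pv_contains_add]
      have hm : pvMatch v p.2 = true := h
      cases PySem.Set.contains m x <;> cases hx : (x == p.1) <;> simp [hm]
    · rw [if_neg h, ih]
      simp only [Bool.not_eq_true] at h
      have hm : pvMatch v p.2 = false := h
      simp [hm]

theorem contains_matched (vulns : List (List (String × String)))
    (reqs : List (String × List String)) (m : PySem.Set String) (x : String) :
    PySem.Set.contains
      (vulns.foldl (fun m vuln =>
        reqs.foldl (fun m p =>
          if p.2.any (fun keyword =>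
              PySem.Str.isIn keyword (PySem.Str.lower ((List.lookup "description" vuln).getD ""))) then
            PySem.Set.add m p.1
          else m) m) m) x
      = (PySem.Set.contains m x || vulns.any (fun v => reqs.any (fun p => x == p.1 && pvMatch v p.2))) := by
  induction vulns generalizing m with
  | nil => simp
  | cons v rest ih =>
    simp only [List.foldl_cons, List.any_cons]
    rw [ih, contains_innerB]
    cases PySem.Set.contains m x <;> simp

theorem any_key_unique (reqs : List (String × List String))
    (h : (reqs.map Prod.fst).Nodup) (p : String × List String) (hp : p ∈ reqs)
    (v : List (String × String)) :
    reqs.any (fun q => p.1 == q.1 && pvMatch v q.2) = pvMatch v p.2 := by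
  induction reqs with
  | nil => cases hp
  | cons q rest ih =>
    simp only [List.map_cons, List.nodup_cons] at h
    rcases List.mem_cons.mp hp with hq | hq
    · subst hq
      simp only [List.any_cons, beq_self_eq_true, Bool.true_and]
      have : rest.any (fun q => p.1 == q.1 && pvMatch v q.2) = false := by
        rw [List.any_eq_false]
        intro r hr
        have : p.1 ≠ r.1 := fun he => h.1 (he ▸ List.mem_map_of_mem hr)
        simp [this]
      rw [this]; cases pvMatch v p.2 <;> simp
    · have hne : p.1 ≠ q.1 := by
        intro he
        exact h.1 (he ▸ List.mem_map_of_mem hq)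
      simp [List.any_cons, hne, ih h.2 hq]

theorem pci_keys_nodup : (pciRequirements.map Prod.fst).Nodup := by decide

-- ===== VERDICT (by name: the statement is the Claim_ definition above) =====
theorem check_pci_dss_compliance_py_spec : Claim_equal_check_pci_dss_compliance_py := by
  intro vulns _
  show check_pci_dss_compliance_py vulns = check_pci_dss_compliance_py_alt vulns
  unfold check_pci_dss_compliance_py check_pci_dss_compliance_py_alt
  rw [foldA_eq, List.nil_append]
  simp only [List.filter_map]
  congr 1
  apply List.filter_congr
  intro p hp
  simp only [Function.comp_apply, contains_matched]
  have h1 : PySem.Set.contains (PySem.Set.empty : PySem.Set String) p.1 = false := by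
    simp [PySem.Set.empty]
  rw [h1, Bool.false_or]
  have h2 : (fun v => pciRequirements.any fun q => p.1 == q.1 && pvMatch v q.2)
      = fun v => pvMatch v p.2 := funext (any_key_unique _ pci_keys_nodup p hp)
  rw [h2]
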